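-- pv_equiv track=rewrite | github.com/DariaFil/Python3 | db_commands.py | length_statistics
-- ===== SOURCE A (Python) =====
-- def length_statistics(word_dict):
--     """
--     Подсчёт частот встречаемости слов определённой длины
--     :param word_dict: словарь слов и их частот
--     :return: словарь длин слов и их частот
--     """
--     length = {}
--     # Словарь частот длин слов
--     for word in word_dict.keys():
--         if length.get(len(word)) is None:
--             length.update({len(word): word_dict[word]})
--         else:
--             length[len(word)] += word_dict[word]
--     return length
-- ===== SOURCE B (Python) =====
-- def length_statistics(word_dict):
--     lengths = list(dict.fromkeys(len(w) for w in word_dict))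
--     return {L: sum(c for w, c in word_dict.items() if len(w) == L) for L in lengths}
-- ===== Notes on version B (the rewrite author's own statement) =====
-- stated objective: alternative
-- what changed: Replaces A's single-pass incremental dict accumulation with a two-pass decomposition: dedup the word lengths in first-occurrence order, then compute each length's total as one filtered sum over the items.
import Mathlib
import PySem

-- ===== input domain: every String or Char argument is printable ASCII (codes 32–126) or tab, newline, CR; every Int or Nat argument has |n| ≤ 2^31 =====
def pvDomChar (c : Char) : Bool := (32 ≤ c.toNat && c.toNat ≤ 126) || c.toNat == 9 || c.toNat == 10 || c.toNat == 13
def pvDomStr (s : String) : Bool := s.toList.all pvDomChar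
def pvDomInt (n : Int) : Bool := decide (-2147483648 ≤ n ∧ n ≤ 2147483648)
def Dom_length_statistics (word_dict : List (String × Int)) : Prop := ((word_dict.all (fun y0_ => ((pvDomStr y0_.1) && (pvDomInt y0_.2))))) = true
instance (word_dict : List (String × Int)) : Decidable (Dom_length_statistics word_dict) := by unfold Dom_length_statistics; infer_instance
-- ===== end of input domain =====

-- B replaces A's incremental dict accumulation by a two-pass decomposition (dedup the
-- lengths in first-occurrence order, then one filtered sum per distinct length); objective:
-- alternative (no speed claim).

-- ===== PORT A =====
-- A iterates word_dict.keys() and indexes word_dict[word]; since word is always a key,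
-- the lookup never raises, so it is ported exactly by getD with an unreachable default.
def length_statistics (word_dict : List (String × Int)) : List (Int × Int) :=
  let d := PySem.Dict.ofList word_dict
  (d.keys.foldl (fun (length : PySem.Dict Int Int) word =>
      match length.get? (PySem.Str.len word) with
      | none => length.insert (PySem.Str.len word) (d.getD word 0)
      | some c => length.insert (PySem.Str.len word) (c + d.getD word 0))
    PySem.Dict.empty).items

-- ===== PORT B =====
def length_statistics_alt (word_dict : List (String × Int)) : List (Int × Int) :=
  let d := PySem.Dict.ofList word_dict
  let lengths := PySem.List.dedup (d.keys.map (fun w => PySem.Str.len w))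
  lengths.map (fun L =>
    (L, ((d.items.filter (fun p => PySem.Str.len p.1 == L)).map (fun p => p.2)).sum))

-- ===== PRECONDITION & SPEC =====
def Spec_length_statistics (word_dict : List (String × Int)) (out : List (Int × Int)) : Prop := out = length_statistics_alt word_dict
instance (word_dict : List (String × Int)) (out : List (Int × Int)) : Decidable (Spec_length_statistics word_dict out) := by unfold Spec_length_statistics; infer_instance

-- ===== CLAIM (what is proved, stated in full; the proofs are below) =====
def Claim_equal_length_statistics : Prop := ∀ (word_dict : List (String × Int)), Dom_length_statistics word_dict → Spec_length_statistics word_dict (length_statistics word_dict)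

-- ===== LEMMAS AND PROOFS =====

-- A's loop body, rewritten on (word, value) pairs: it is exactly a `modify` at key len(word).
def pvStep (a : PySem.Dict Int Int) (p : String × Int) : PySem.Dict Int Int :=
  a.modify (PySem.Str.len p.1) 0 (· + p.2)

-- the per-length total B computes
def pvSum (ps : List (String × Int)) (L : Int) : Int :=
  ((ps.filter (fun p => PySem.Str.len p.1 == L)).map (fun p => p.2)).sum

lemma getD_fold (ps : List (String × Int)) (acc : PySem.Dict Int Int) (L : Int) :
    (ps.foldl pvStep acc).getD L 0 = acc.getD L 0 + pvSum ps L := by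
  induction ps generalizing acc with
  | nil => simp [pvSum]
  | cons p ps ih =>
    simp only [List.foldl_cons]
    rw [ih]
    simp only [pvStep, PySem.Dict.getD_modify, pvSum, List.filter_cons, beq_iff_eq,
      PySem.Str.len]
    split_ifs <;> (simp_all; try ring)

lemma match_eq_pvStep (d : PySem.Dict String Int) (hnd : d.keys.Nodup)
    (a : PySem.Dict Int Int) (p : String × Int) (hp : p ∈ d.items) :
    (match a.get? (PySem.Str.len p.1) with
      | none => a.insert (PySem.Str.len p.1) (d.getD p.1 0)
      | some c => a.insert (PySem.Str.len p.1) (c + d.getD p.1 0)) = pvStep a p := by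
  have hv : d.getD p.1 0 = p.2 := PySem.Dict.getD_of_mem_items d (by exact hp) hnd 0
  unfold pvStep PySem.Dict.modify
  cases hg : a.get? (PySem.Str.len p.1) with
  | none =>
    rw [hv, PySem.Dict.getD_of_get?_eq_none a 0 hg]
    norm_num
  | some c =>
    rw [hv, PySem.Dict.getD_of_get?_eq_some a 0 hg]

lemma foldA_eq (d : PySem.Dict String Int) (hnd : d.keys.Nodup) :
    d.keys.foldl (fun (length : PySem.Dict Int Int) word =>
      match length.get? (PySem.Str.len word) with
      | none => length.insert (PySem.Str.len word) (d.getD word 0)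
      | some c => length.insert (PySem.Str.len word) (c + d.getD word 0))
        PySem.Dict.empty
    = d.items.foldl pvStep PySem.Dict.empty := by
  have hk : d.keys = d.items.map (fun p => p.1) := rfl
  rw [hk, List.foldl_map]
  exact PySem.List.foldl_congr_mem _ _ _ _ (fun a p hp => match_eq_pvStep d hnd a p hp)

-- ===== VERDICT (by name: the statement is the Claim_ definition above) =====
theorem length_statistics_spec : Claim_equal_length_statistics := by
  intro word_dict _
  unfold Spec_length_statistics length_statistics length_statistics_alt
  dsimp only
  have hnd := PySem.Dict.nodup_keys_ofList word_dict
  generalize hgen : PySem.Dict.ofList word_dict = d at hnd ⊢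
  rw [foldA_eq d hnd]
  set D := d.items.foldl pvStep PySem.Dict.empty with hD
  have hkeys : D.keys = PySem.List.dedup (d.items.map (fun p => PySem.Str.len p.1)) := by
    have := PySem.Dict.keys_foldl_modify_key d.items (fun p => PySem.Str.len p.1) 0
      (fun _ p => (· + p.2)) PySem.Dict.empty
    simpa [pvStep, PySem.Dict.keys_empty, PySem.Set.update_nil_left,
      PySem.List.dedup_eq_ofList] using this
  have hndD : D.keys.Nodup := by
    have := PySem.Dict.nodup_keys_foldl_modify_key d.items (fun p => PySem.Str.len p.1) 0
      (fun _ p => (· + p.2)) PySem.Dict.empty (by simp [PySem.Dict.keys_empty])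
    simpa [pvStep] using this
  have hitems : D.items = D.keys.map (fun k => (k, D.getD k 0)) :=
    PySem.Dict.items_eq_map_keys D hndD 0
  rw [hitems, hkeys]
  have hlen : d.keys.map (fun w => PySem.Str.len w) = d.items.map (fun p => PySem.Str.len p.1) := by
    have hk : d.keys = d.items.map (fun p => p.1) := rfl
    rw [hk, List.map_map]; rfl
  rw [hlen]
  apply List.map_congr_left
  intro L _
  have := getD_fold d.items PySem.Dict.empty L
  simp only [PySem.Dict.getD_empty] at this
  rw [hD, this]
  simp [pvSum]
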